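-- pv_equiv track=rewrite | github.com/DawnsonLi/GFSAD | ours/visio.py | truth_predict
-- ===== SOURCE A (Python) =====
-- def truth_predict(real, predict, delay = 7):
--     counter = 0#记录异常片段的长度
--     find = False
--     ans = []
--     for i in range(len(predict)):
--         if real[i] == 0:#正常数据
--             if find:
--                 for j in range(counter):
--                     ans.append(1)#tp
--                 counter = 0
--                 find = False
--             else:
--                 for j in range(counter):
--                     ans.append(2)#fn
--                 counter = 0
--             if predict[i] == 0:
--                 ans.append(3)#tn
--             else:
--                 ans.append(4)#fp
--         else:
--             if predict[i] != 0 and counter <= delay: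
--                 find = True
--             counter += 1
--             #print counter
--     if counter > 0 and find:#处理尾部是异常的情况
--         for j in range(counter):
--             ans.append(1)#tp
--     if counter >0 and find == False:
--         for j in range(counter):
--             ans.append(3)#fn
--     return ans
-- ===== SOURCE B (Python) =====
-- def truth_predict(real, predict, delay=7):
--     # run-grouping re-implementation: scan maximal anomaly runs, then emit blocks
--     n = len(predict)
--     ans = []
--     i = 0
--     while i < n:
--         if real[i] == 0:
--             ans.append(3 if predict[i] == 0 else 4)
--             i += 1
--         else:
--             j = i + 1
--             while j < n and real[j] != 0:
--                 j += 1
--             find = any(predict[k] != 0 and k - i <= delay for k in range(i, j))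
--             ans.extend([1 if find else (2 if j < n else 3)] * (j - i))
--             i = j
--     return ans
-- ===== Notes on version B (the rewrite author's own statement) =====
-- stated objective: alternative
-- what changed: Replaces A's single-pass counter/find state machine with a run-grouping scan: maximal anomaly runs are identified, each run's detection is an any() over its delay window, and the output is emitted as per-run blocks.
-- outside the precondition, e.g. on truth_predict([0], [0, 1], 7): A raises IndexError, B raises IndexError
import Mathlib
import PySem

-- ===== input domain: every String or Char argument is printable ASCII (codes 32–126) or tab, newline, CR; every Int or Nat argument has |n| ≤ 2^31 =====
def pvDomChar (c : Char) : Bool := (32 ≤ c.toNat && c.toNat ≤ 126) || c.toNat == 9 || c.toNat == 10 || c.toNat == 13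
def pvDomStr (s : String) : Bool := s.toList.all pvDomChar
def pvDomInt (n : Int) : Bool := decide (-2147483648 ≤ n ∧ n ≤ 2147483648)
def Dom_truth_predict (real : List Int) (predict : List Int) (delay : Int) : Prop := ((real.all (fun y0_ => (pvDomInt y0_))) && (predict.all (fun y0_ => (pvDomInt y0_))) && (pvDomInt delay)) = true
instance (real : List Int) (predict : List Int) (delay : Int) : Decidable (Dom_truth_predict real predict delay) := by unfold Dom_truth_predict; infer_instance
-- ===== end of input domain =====

-- B is an alternative decomposition (run-grouping two-level scan instead of A's counter/find
-- state machine); same O(n+total cost) behaviour, equal return value on Pre_.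

-- ===== PORT A =====
-- literal port of A's single loop: state (counter, find, ans), then the two tail flushes
def truth_predict_go (real : List Int) (predict : List Int) (delay : Int) (n : Nat)
    (i : Nat) (counter : Nat) (find : Bool) (ans : List Int) : List Int :=
  if i < n then
    if real.getD i 0 = 0 then
      let ans1 := ans ++ List.replicate counter (if find then (1 : Int) else 2)
      let ans2 := ans1 ++ [if predict.getD i 0 = 0 then (3 : Int) else 4]
      truth_predict_go real predict delay n (i + 1) 0 false ans2
    else
      truth_predict_go real predict delay n (i + 1) (counter + 1)
        (if predict.getD i 0 ≠ 0 ∧ (counter : Int) ≤ delay then true else find) ans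
  else
    if counter > 0 ∧ find = true then ans ++ List.replicate counter (1 : Int)
    else if counter > 0 ∧ find = false then ans ++ List.replicate counter (3 : Int)
    else ans
termination_by n - i

def truth_predict (real : List Int) (predict : List Int) (delay : Int) : List Int :=
  truth_predict_go real predict delay predict.length 0 0 false []

-- ===== PORT B =====
-- end of the maximal anomaly run starting at i (first k ≥ i with k = n or real[k] = 0)
def pvRunEnd (real : List Int) (n : Nat) (i : Nat) : Nat :=
  if i < n then (if real.getD i 0 = 0 then i else pvRunEnd real n (i + 1)) else n
termination_by n - i

lemma pvRunEnd_ge_aux (real : List Int) (n : Nat) :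
    ∀ d i, n - i ≤ d → i ≤ n → i ≤ pvRunEnd real n i := by
  intro d
  induction d with
  | zero =>
    intro i hd hin
    unfold pvRunEnd
    split
    · omega
    · exact hin
  | succ d ih =>
    intro i hd hin
    unfold pvRunEnd
    split
    · split
      · exact le_refl i
      · exact le_trans (Nat.le_succ i) (ih (i + 1) (by omega) (by omega))
    · exact hin

lemma pvRunEnd_ge (real : List Int) (n : Nat) (i : Nat) (hin : i ≤ n) :
    i ≤ pvRunEnd real n i :=
  pvRunEnd_ge_aux real n (n - i) i le_rfl hin

def truth_predict_alt_go (real : List Int) (predict : List Int) (delay : Int) (n : Nat)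
    (i : Nat) : List Int :=
  if h : i < n then
    if real.getD i 0 = 0 then
      (if predict.getD i 0 = 0 then (3 : Int) else 4) :: truth_predict_alt_go real predict delay n (i + 1)
    else
      let j := pvRunEnd real n (i + 1)
      let find := (List.range' i (j - i)).any
        (fun k => (predict.getD k 0 != 0) && decide ((((k - i : Nat)) : Int) ≤ delay))
      List.replicate (j - i) (if find then (1 : Int) else if j < n then 2 else 3) ++
        truth_predict_alt_go real predict delay n j
  else []
termination_by n - i
decreasing_by
  · omega
  · have := pvRunEnd_ge real n (i + 1) (by omega)
    omega

def truth_predict_alt (real : List Int) (predict : List Int) (delay : Int) : List Int :=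
  truth_predict_alt_go real predict delay predict.length 0

-- ===== PRECONDITION & SPEC =====
-- Pre_ excludes exactly the inputs where Python A raises IndexError: real shorter than predict.
def Pre_truth_predict (real : List Int) (predict : List Int) (delay : Int) : Prop :=
  predict.length ≤ real.length
instance (real : List Int) (predict : List Int) (delay : Int) : Decidable (Pre_truth_predict real predict delay) := by unfold Pre_truth_predict; infer_instance
def pvWitness_truth_predict : List Int × List Int × Int := ([1, 0, 1], [0, 1, 1], 1)

def Spec_truth_predict (real : List Int) (predict : List Int) (delay : Int) (out : List Int) : Prop := out = truth_predict_alt real predict delay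
instance (real : List Int) (predict : List Int) (delay : Int) (out : List Int) : Decidable (Spec_truth_predict real predict delay out) := by unfold Spec_truth_predict; infer_instance

-- ===== CLAIM (what is proved, stated in full; the proofs are below) =====
def Claim_equal_truth_predict : Prop := ∀ (real : List Int) (predict : List Int) (delay : Int), Dom_truth_predict real predict delay → Pre_truth_predict real predict delay → Spec_truth_predict real predict delay (truth_predict real predict delay)

-- ===== LEMMAS AND PROOFS =====

-- membership-restricted congruence for List.any (Mathlib's List.any_congr needs full equality)
lemma pvAnyCongrMem {α : Type} (l : List α) (p q : α → Bool) (h : ∀ a ∈ l, p a = q a) :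
    l.any p = l.any q := by
  induction l with
  | nil => rfl
  | cons a t ih => simp_all

lemma pvRunEnd_spec_aux (real : List Int) (n : Nat) :
    ∀ d i, n - i ≤ d → i ≤ n →
      pvRunEnd real n i ≤ n ∧
      (∀ k, i ≤ k → k < pvRunEnd real n i → real.getD k 0 ≠ 0) ∧
      (pvRunEnd real n i < n → real.getD (pvRunEnd real n i) 0 = 0) := by
  intro d
  induction d with
  | zero =>
    intro i hd hin
    have hni : ¬ i < n := by omega
    rw [pvRunEnd, if_neg hni]
    exact ⟨le_rfl, fun k hk1 hk2 => by omega, fun h => by omega⟩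
  | succ d ih =>
    intro i hd hin
    by_cases hni : i < n
    · rw [pvRunEnd, if_pos hni]
      by_cases hz : real.getD i 0 = 0
      · rw [if_pos hz]
        exact ⟨le_of_lt hni, fun k hk1 hk2 => by omega, fun _ => hz⟩
      · rw [if_neg hz]
        obtain ⟨h1, h2, h3⟩ := ih (i + 1) (by omega) (by omega)
        refine ⟨h1, fun k hk1 hk2 => ?_, h3⟩
        rcases Nat.eq_or_lt_of_le hk1 with h | h
        · exact h ▸ hz
        · exact h2 k h hk2
    · rw [pvRunEnd, if_neg hni]
      exact ⟨le_rfl, fun k hk1 hk2 => by omega, fun h => by omega⟩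

-- A's loop across a block of anomalous positions: counter grows, find accumulates the window test
lemma pvAGo_run (real predict : List Int) (delay : Int) (n : Nat) :
    ∀ len i c f ans, i + len ≤ n → (∀ k, i ≤ k → k < i + len → real.getD k 0 ≠ 0) →
      truth_predict_go real predict delay n i c f ans =
      truth_predict_go real predict delay n (i + len) (c + len)
        (f || (List.range' i len).any
          (fun k => (predict.getD k 0 != 0) && decide (((c : Int) + ((k - i : Nat) : Int)) ≤ delay))) ans := by
  intro len
  induction len with
  | zero => intro i c f ans _ _; simp
  | succ len ih =>
    intro i c f ans hle hrun
    have hni : i < n := by omega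
    have hri : real.getD i 0 ≠ 0 := hrun i le_rfl (by omega)
    rw [truth_predict_go, if_pos hni, if_neg hri]
    rw [ih (i + 1) (c + 1) _ ans (by omega) (fun k hk1 hk2 => hrun k (by omega) (by omega))]
    have harith1 : i + 1 + len = i + (len + 1) := by omega
    have harith2 : c + 1 + len = c + (len + 1) := by omega
    have hfind :
        ((if predict.getD i 0 ≠ 0 ∧ (c : Int) ≤ delay then true else f) ||
          (List.range' (i + 1) len).any
            (fun k => (predict.getD k 0 != 0) && decide ((((c + 1 : Nat) : Int) + ((k - (i + 1) : Nat) : Int)) ≤ delay))) =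
        (f || (List.range' i (len + 1)).any
          (fun k => (predict.getD k 0 != 0) && decide (((c : Int) + ((k - i : Nat) : Int)) ≤ delay))) := by
      rw [List.range'_succ, List.any_cons]
      have hcg : (List.range' (i + 1) len).any
            (fun k => (predict.getD k 0 != 0) && decide ((((c + 1 : Nat) : Int) + ((k - (i + 1) : Nat) : Int)) ≤ delay)) =
          (List.range' (i + 1) len).any
            (fun k => (predict.getD k 0 != 0) && decide (((c : Int) + ((k - i : Nat) : Int)) ≤ delay)) := by
        apply pvAnyCongrMem
        intro k hk
        have hk1 : i + 1 ≤ k := (List.mem_range'_1.mp hk).1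
        have : (((c + 1 : Nat) : Int) + ((k - (i + 1) : Nat) : Int)) = ((c : Int) + ((k - i : Nat) : Int)) := by
          have h1 : k - i = (k - (i + 1)) + 1 := by omega
          rw [h1]
          push_cast
          ring
        rw [this]
      rw [hcg]
      cases f <;> by_cases hp : predict.getD i 0 = 0 <;> by_cases hc : (c : Int) ≤ delay <;>
        (simp [List.getD, hp, hc, bne, BEq.beq]; try rfl)
    rw [harith1, harith2, hfind]

-- main bridge: from any fresh state (counter 0, find false) A's loop appends exactly B's output
lemma pvMain (real predict : List Int) (delay : Int) (n : Nat) :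
    ∀ d i ans, n - i ≤ d →
      truth_predict_go real predict delay n i 0 false ans =
      ans ++ truth_predict_alt_go real predict delay n i := by
  intro d
  induction d with
  | zero =>
    intro i ans hd
    have hni : ¬ i < n := by omega
    rw [truth_predict_go, if_neg hni, truth_predict_alt_go, dif_neg hni]
    simp
  | succ d ih =>
    intro i ans hd
    by_cases hni : i < n
    · by_cases hz : real.getD i 0 = 0
      · rw [truth_predict_go, if_pos hni, if_pos hz, truth_predict_alt_go, dif_pos hni, if_pos hz]
        show truth_predict_go real predict delay n (i + 1) 0 false
            ((ans ++ List.replicate 0 (if false = true then (1:Int) else 2)) ++ [if predict.getD i 0 = 0 then (3:Int) else 4]) = _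
        rw [ih (i + 1) _ (by omega)]
        simp
      · -- anomaly run from i to j
        set j := pvRunEnd real n (i + 1) with hj
        have hij : i + 1 ≤ j := by rw [hj]; exact pvRunEnd_ge real n (i + 1) (by omega)
        obtain ⟨hjle, hjrun, hjstop⟩ := pvRunEnd_spec_aux real n (n - (i + 1)) (i + 1) le_rfl (by omega)
        rw [← hj] at hjle hjrun hjstop
        have hrun : ∀ k, i ≤ k → k < j → real.getD k 0 ≠ 0 := by
          intro k hk1 hk2
          rcases Nat.eq_or_lt_of_le hk1 with h | h
          · exact h ▸ hz
          · exact hjrun k h hk2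
        have hstep := pvAGo_run real predict delay n (j - i) i 0 false ans (by omega)
          (fun k hk1 hk2 => hrun k hk1 (by omega))
        rw [show i + (j - i) = j by omega] at hstep
        simp only [Bool.false_or, Nat.cast_zero, zero_add] at hstep
        set F := (List.range' i (j - i)).any
          (fun k => (predict.getD k 0 != 0) && decide ((((k - i : Nat)) : Int) ≤ delay)) with hF
        rw [truth_predict_alt_go, dif_pos hni, if_neg hz]
        simp only
        rw [← hj, ← hF, hstep]
        have hpos : 0 < j - i := by omega
        rcases Nat.eq_or_lt_of_le hjle with hjn | hjn
        · -- run reaches the end of the sequence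
          rw [truth_predict_go, if_neg (by omega : ¬ j < n)]
          have halt : truth_predict_alt_go real predict delay n j = [] := by
            rw [truth_predict_alt_go, dif_neg (by omega : ¬ j < n)]
          rw [halt]
          cases hFv : F with
          | true =>
            rw [if_pos ⟨hpos, rfl⟩]
            simp [hjn]
          | false =>
            rw [if_neg (by simp), if_pos ⟨hpos, rfl⟩]
            simp [hjn]
        · -- run ends at a normal position j < n
          have hzj : real.getD j 0 = 0 := hjstop hjn
          rw [truth_predict_go, if_pos hjn, if_pos hzj]
          show truth_predict_go real predict delay n (j + 1) 0 false
              ((ans ++ List.replicate (j - i) (if F = true then (1:Int) else 2)) ++ [if predict.getD j 0 = 0 then (3:Int) else 4]) = _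
          rw [ih (j + 1) _ (by omega)]
          conv_rhs => rw [truth_predict_alt_go]
          rw [dif_pos hjn, if_pos hzj]
          have hv : (if F = true then (1:Int) else if j < n then 2 else 3) = (if F = true then (1:Int) else 2) := by
            cases F <;> simp [hjn]
          rw [hv]
          simp
    · rw [truth_predict_go, if_neg hni, truth_predict_alt_go, dif_neg hni]
      simp

-- ===== VERDICT (by name: the statement is the Claim_ definition above) =====
theorem truth_predict_spec : Claim_equal_truth_predict := by
  intro real predict delay _ _
  unfold Spec_truth_predict truth_predict truth_predict_alt
  exact pvMain real predict delay predict.length predict.length 0 [] (by omega)
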